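-- pv_equiv track=rewrite | github.com/ThinkFoundation/ThinkOS-Client | backend/app/models_info.py | get_context_window
-- ===== SOURCE A (Python) =====
-- MODEL_CONTEXT_WINDOWS = {
--     # Ollama / Llama models
--     "llama3.2": 128000,
--     "llama3.2:1b": 128000,
--     "llama3.2:3b": 128000,
--     "llama3.1": 128000,
--     "llama3": 8192,
--     "llama2": 4096,
--     # Mistral models
--     "mistral": 32768,
--     "mixtral": 32768,
--     "mistral-nemo": 128000,
--     # Other Ollama models
--     "codellama": 16384,
--     "phi3": 128000,
--     "phi3:mini": 128000,
--     "gemma2": 8192,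
--     "gemma": 8192,
--     "qwen2": 32768,
--     "qwen2.5": 32768,
--     "deepseek-coder": 16384,
--     # OpenAI models
--     "gpt-4o": 128000,
--     "gpt-4o-mini": 128000,
--     "gpt-4-turbo": 128000,
--     "gpt-4-turbo-preview": 128000,
--     "gpt-4": 8192,
--     "gpt-4-32k": 32768,
--     "gpt-3.5-turbo": 16385,
--     "gpt-3.5-turbo-16k": 16385,
--     # Claude models (for OpenAI-compatible APIs)
--     "claude-3-opus": 200000,
--     "claude-3-sonnet": 200000,
--     "claude-3-haiku": 200000,
--     "claude-3.5-sonnet": 200000,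
-- }
--
-- DEFAULT_CONTEXT_WINDOW = 4096
--
-- def get_context_window(model_name: str) -> int:
--     """Get context window size for a model, falling back to default."""
--     if not model_name:
--         return DEFAULT_CONTEXT_WINDOW
--
--     # Handle provider prefix (e.g., "openai/gpt-4o" -> "gpt-4o")
--     if "/" in model_name:
--         model_name = model_name.split("/")[-1]
--
--     # Try exact match first
--     if model_name in MODEL_CONTEXT_WINDOWS:
--         return MODEL_CONTEXT_WINDOWS[model_name]
--
--     # Handle model variants (e.g., "llama3.2:latest" -> "llama3.2")
--     base_name = model_name.split(":")[0]
--     if base_name in MODEL_CONTEXT_WINDOWS: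
--         return MODEL_CONTEXT_WINDOWS[base_name]
--
--     # Try removing version suffixes (e.g., "gpt-4-0125-preview" -> "gpt-4")
--     parts = base_name.split("-")
--     for i in range(len(parts), 0, -1):
--         partial = "-".join(parts[:i])
--         if partial in MODEL_CONTEXT_WINDOWS:
--             return MODEL_CONTEXT_WINDOWS[partial]
--
--     return DEFAULT_CONTEXT_WINDOW
-- ===== SOURCE B (Python) =====
-- MODEL_CONTEXT_WINDOWS = {
--     "llama3.2": 128000,
--     "llama3.2:1b": 128000,
--     "llama3.2:3b": 128000,
--     "llama3.1": 128000,
--     "llama3": 8192,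
--     "llama2": 4096,
--     "mistral": 32768,
--     "mixtral": 32768,
--     "mistral-nemo": 128000,
--     "codellama": 16384,
--     "phi3": 128000,
--     "phi3:mini": 128000,
--     "gemma2": 8192,
--     "gemma": 8192,
--     "qwen2": 32768,
--     "qwen2.5": 32768,
--     "deepseek-coder": 16384,
--     "gpt-4o": 128000,
--     "gpt-4o-mini": 128000,
--     "gpt-4-turbo": 128000,
--     "gpt-4-turbo-preview": 128000,
--     "gpt-4": 8192,
--     "gpt-4-32k": 32768,
--     "gpt-3.5-turbo": 16385,
--     "gpt-3.5-turbo-16k": 16385,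
--     "claude-3-opus": 200000,
--     "claude-3-sonnet": 200000,
--     "claude-3-haiku": 200000,
--     "claude-3.5-sonnet": 200000,
-- }
--
-- DEFAULT_CONTEXT_WINDOW = 4096
--
--
-- def get_context_window(model_name: str) -> int:
--     """Get context window size for a model, falling back to default.
--
--     Exact-name lookup first; otherwise scan the table once and return the
--     value of the longest key that matches the base name at a hyphen
--     boundary (A's descending-prefix probing returns exactly that key).
--     """
--     if not model_name:
--         return DEFAULT_CONTEXT_WINDOW
--     name = model_name.split("/")[-1]
--     if name in MODEL_CONTEXT_WINDOWS:
--         return MODEL_CONTEXT_WINDOWS[name]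
--     base = name.split(":")[0]
--     best_len = -1
--     best_val = DEFAULT_CONTEXT_WINDOW
--     for key, val in MODEL_CONTEXT_WINDOWS.items():
--         if (key == base or base.startswith(key + "-")) and len(key) > best_len:
--             best_len = len(key)
--             best_val = val
--     return best_val
-- ===== Notes on version B (the rewrite author's own statement) =====
-- stated objective: alternative
-- what changed: B drops A's candidate generation (colon-stripped base name, hyphen-split parts rejoined into descending prefixes probed one by one) and instead, after the exact-name lookup, scans the dictionary once keeping the longest key that matches the base name at a hyphen boundary; A's descending-prefix probing returns exactly that longest matching key.
import Mathlib
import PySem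

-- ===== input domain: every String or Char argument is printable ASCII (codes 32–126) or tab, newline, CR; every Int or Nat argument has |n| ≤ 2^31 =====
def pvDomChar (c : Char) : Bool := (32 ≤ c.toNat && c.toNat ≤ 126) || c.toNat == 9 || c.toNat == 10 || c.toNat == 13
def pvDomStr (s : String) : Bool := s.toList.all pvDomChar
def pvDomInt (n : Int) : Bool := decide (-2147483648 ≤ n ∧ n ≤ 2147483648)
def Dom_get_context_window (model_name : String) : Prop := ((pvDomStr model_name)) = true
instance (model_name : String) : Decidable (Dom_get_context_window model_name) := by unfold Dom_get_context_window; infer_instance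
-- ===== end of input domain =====

-- B replaces A's candidate generation (split(':'), split('-'), rejoined descending prefixes
-- probed one by one) by an exact lookup followed by ONE scan of the dictionary keeping the
-- longest key matching the base name at a hyphen boundary (objective: alternative).

-- module-level constants shared by both Pythons
def pvMODEL_CONTEXT_WINDOWS : PySem.Dict String Int := PySem.Dict.ofList [
  ("llama3.2", 128000),
  ("llama3.2:1b", 128000),
  ("llama3.2:3b", 128000),
  ("llama3.1", 128000),
  ("llama3", 8192),
  ("llama2", 4096),
  ("mistral", 32768),
  ("mixtral", 32768),
  ("mistral-nemo", 128000),
  ("codellama", 16384),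
  ("phi3", 128000),
  ("phi3:mini", 128000),
  ("gemma2", 8192),
  ("gemma", 8192),
  ("qwen2", 32768),
  ("qwen2.5", 32768),
  ("deepseek-coder", 16384),
  ("gpt-4o", 128000),
  ("gpt-4o-mini", 128000),
  ("gpt-4-turbo", 128000),
  ("gpt-4-turbo-preview", 128000),
  ("gpt-4", 8192),
  ("gpt-4-32k", 32768),
  ("gpt-3.5-turbo", 16385),
  ("gpt-3.5-turbo-16k", 16385),
  ("claude-3-opus", 200000),
  ("claude-3-sonnet", 200000),
  ("claude-3-haiku", 200000),
  ("claude-3.5-sonnet", 200000)]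

def pvDEFAULT_CONTEXT_WINDOW : Int := 4096

-- ===== PORT A =====
-- A's 'for i in range(len(parts), 0, -1): … return …' with early return
def pvLoopA (parts : List String) : List Int → Int
  | [] => pvDEFAULT_CONTEXT_WINDOW
  | i :: rest =>
    let partial_ := PySem.Str.join "-" (PySem.List.slice parts none (some i))
    match pvMODEL_CONTEXT_WINDOWS.get? partial_ with
    | some v => v
    | none => pvLoopA parts rest

def get_context_window (model_name : String) : Int :=
  if model_name = "" then pvDEFAULT_CONTEXT_WINDOW
  else
    let model_name :=
      if PySem.Str.isIn "/" model_name then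
        PySem.List.pyGetD ((PySem.Str.split? model_name "/").getD []) (-1) ""
      else model_name
    match pvMODEL_CONTEXT_WINDOWS.get? model_name with
    | some v => v
    | none =>
      let base_name := PySem.List.pyGetD ((PySem.Str.split? model_name ":").getD []) 0 ""
      match pvMODEL_CONTEXT_WINDOWS.get? base_name with
      | some v => v
      | none =>
        let parts := (PySem.Str.split? base_name "-").getD []
        pvLoopA parts (PySem.List.pyRange (parts.length : Int) 0 (-1))

-- ===== PORT B =====
-- B's loop body: keep the longest key matching base at a hyphen boundary
def pvBestStep (base : String) (st : Int × Int) (kv : String × Int) : Int × Int :=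
  if (kv.1 = base ∨ PySem.Str.startswith base (kv.1 ++ "-") = true) ∧ st.1 < PySem.Str.len kv.1
  then (PySem.Str.len kv.1, kv.2) else st

def get_context_window_alt (model_name : String) : Int :=
  if model_name = "" then pvDEFAULT_CONTEXT_WINDOW
  else
    let name := PySem.List.pyGetD ((PySem.Str.split? model_name "/").getD []) (-1) ""
    match pvMODEL_CONTEXT_WINDOWS.get? name with
    | some v => v
    | none =>
      let base := PySem.List.pyGetD ((PySem.Str.split? name ":").getD []) 0 ""
      (pvMODEL_CONTEXT_WINDOWS.items.foldl (pvBestStep base)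
        (-1, pvDEFAULT_CONTEXT_WINDOW)).2

-- ===== PRECONDITION & SPEC =====
def Spec_get_context_window (model_name : String) (out : Int) : Prop := out = get_context_window_alt model_name
instance (model_name : String) (out : Int) : Decidable (Spec_get_context_window model_name out) := by unfold Spec_get_context_window; infer_instance

-- ===== CLAIM (what is proved, stated in full; the proofs are below) =====
def Claim_equal_get_context_window : Prop := ∀ (model_name : String), Dom_get_context_window model_name → Spec_get_context_window model_name (get_context_window model_name)

-- ===== LEMMAS AND PROOFS =====

-- ---------- splitting on "/" that does not occur is a no-op (used for the name strip) ----------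
theorem pvSplitOn_go_not_infix (sep : List Char) :
    ∀ (l : List Char) (fuel : Nat) (cur : List Char) (acc : List (List Char)),
    ¬ sep <:+: l →
    PySem.Chars.splitOn.go sep fuel l cur acc = ((cur.reverse ++ l) :: acc).reverse := by
  intro l
  induction l with
  | nil =>
    intro fuel cur acc _
    cases fuel <;> simp [PySem.Chars.splitOn.go]
  | cons c rest ih =>
    intro fuel cur acc h
    cases fuel with
    | zero => simp [PySem.Chars.splitOn.go]
    | succ fuel =>
      have hpre : sep.isPrefixOf (c :: rest) = false := by
        rw [Bool.eq_false_iff]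
        intro hp
        exact h (List.isPrefixOf_iff_prefix.mp hp).isInfix
      simp only [PySem.Chars.splitOn.go, hpre, Bool.false_eq_true, if_false]
      rw [ih fuel (c :: cur) acc (fun hi => h (hi.trans (List.suffix_cons c rest).isInfix))]
      simp

theorem pvSplit?_of_not_isIn (s sep : String) (hsep : sep.toList ≠ [])
    (h : PySem.Str.isIn sep s = false) :
    PySem.Str.split? s sep = some [s] := by
  have hinf : ¬ sep.toList <:+: s.toList := (PySem.Chars.isIn_eq_false_iff _ _).mp h
  simp only [PySem.Str.split?, PySem.Chars.split?, List.isEmpty_iff, hsep, if_false,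
    PySem.Chars.splitOn, pvSplitOn_go_not_infix sep.toList s.toList _ [] [] hinf]
  simp [String.ofList_toList]

-- ---------- PySem single-character split is List.splitOn ----------
theorem pvModifyHead_id {α : Type} (l : List α) : List.modifyHead (fun x => x) l = l := by
  cases l <;> rfl

theorem pvGo_single (c : Char) :
    ∀ (fuel : Nat) (l cur : List Char) (acc : List (List Char)), l.length ≤ fuel →
    PySem.Chars.splitOn.go [c] fuel l cur acc
      = acc.reverse ++ (l.splitOn c).modifyHead (cur.reverse ++ ·) := by
  intro fuel
  induction fuel with
  | zero =>
    intro l cur acc h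
    have hl : l = [] := List.eq_nil_of_length_eq_zero (Nat.le_zero.mp h)
    subst hl
    simp [PySem.Chars.splitOn.go, List.splitOn]
  | succ fuel ih =>
    intro l cur acc h
    cases l with
    | nil => simp [PySem.Chars.splitOn.go, List.splitOn]
    | cons x rest =>
      by_cases hcx : c = x
      · subst hcx
        have hpre : [c].isPrefixOf (c :: rest) = true := by simp [List.isPrefixOf]
        simp only [PySem.Chars.splitOn.go, hpre, if_true, List.length_cons,
          List.drop_succ_cons, List.length_nil, List.drop_zero]
        rw [ih rest [] (cur.reverse :: acc) (by simp at h; omega)]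
        simp [List.splitOn, List.splitOnP_cons, pvModifyHead_id]
      · have hbcx : (c == x) = false := by simp [hcx]
        have hpre : [c].isPrefixOf (x :: rest) = false := by simp [List.isPrefixOf, hbcx]
        simp only [PySem.Chars.splitOn.go, hpre, Bool.false_eq_true, if_false]
        rw [ih rest (x :: cur) acc (by simp at h; omega)]
        have hbx : (x == c) = false := by simp; exact fun hxc => hcx hxc.symm
        have hx : ((x :: rest).splitOn c).modifyHead (cur.reverse ++ ·)
            = (rest.splitOn c).modifyHead ((x :: cur).reverse ++ ·) := by
          simp only [List.splitOn, List.splitOnP_cons, hbx, Bool.false_eq_true, if_false,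
            List.modifyHead_modifyHead]
          congr 1
          funext p
          simp
        rw [hx]

theorem pvSplitOn_single (c : Char) (l : List Char) :
    PySem.Chars.splitOn l [c] = l.splitOn c := by
  unfold PySem.Chars.splitOn
  rw [pvGo_single c (l.length + 1) l [] [] (Nat.le_succ _)]
  simp only [List.reverse_nil, List.nil_append]
  cases List.splitOn c l <;> rfl

-- ---------- intercalate over nonempty pieces ----------
theorem pvIntercalate_cons {α : Type} (x : α) (a : List α) (b : List (List α)) (hb : b ≠ []) :
    [x].intercalate (a :: b) = a ++ x :: [x].intercalate b := by
  cases b with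
  | nil => exact (hb rfl).elim
  | cons q t => simp [List.intercalate, List.intersperse_cons₂]

theorem pvIntercalate_append {α : Type} (x : α) (a b : List (List α)) (ha : a ≠ []) (hb : b ≠ []) :
    [x].intercalate (a ++ b) = [x].intercalate a ++ x :: [x].intercalate b := by
  induction a with
  | nil => exact (ha rfl).elim
  | cons p t ih =>
    cases t with
    | nil =>
      rw [List.singleton_append, pvIntercalate_cons x p b hb]
      simp [List.intercalate]
    | cons q u =>
      rw [List.cons_append, pvIntercalate_cons x p ((q :: u) ++ b) (by simp),
        pvIntercalate_cons x p (q :: u) (by simp), ih (by simp)]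
      simp

-- ---------- the hyphen-prefix candidates of a base string ----------
def pvCand (bl : List Char) (i : Nat) : List Char :=
  ['-'].intercalate ((bl.splitOn '-').take i)

theorem pvCand_top (bl : List Char) : pvCand bl ((bl.splitOn '-').length) = bl := by
  unfold pvCand
  rw [List.take_length]
  exact List.intercalate_splitOn bl '-'

-- the boundary-match condition is exactly "k is one of A's rejoined prefixes"
theorem pvSplitOn_ne_nil (c : Char) (l : List Char) : l.splitOn c ≠ [] := by
  simp only [List.splitOn]
  exact List.splitOnP_ne_nil _ l

theorem pvSplitOn_len_pos (c : Char) (l : List Char) : 1 ≤ (l.splitOn c).length :=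
  List.length_pos_of_ne_nil (pvSplitOn_ne_nil c l)

theorem pvChar_iff (bl k : List Char) :
    (k = bl ∨ (k ++ ['-']) <+: bl)
      ↔ ∃ i, 1 ≤ i ∧ i ≤ (bl.splitOn '-').length ∧ k = pvCand bl i := by
  constructor
  · rintro (rfl | ⟨r, hr⟩)
    · exact ⟨(k.splitOn '-').length, pvSplitOn_len_pos '-' k, le_refl _, (pvCand_top k).symm⟩
    · have hbl : bl = k ++ '-' :: r := by simpa using hr.symm
      subst hbl
      have hsplit : (k ++ '-' :: r).splitOn '-' = k.splitOn '-' ++ r.splitOn '-' := by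
        simp only [List.splitOn]
        exact List.splitOnP_append_cons (fun y => y == '-') k r '-' (by simp)
      refine ⟨(k.splitOn '-').length, pvSplitOn_len_pos '-' k, ?_, ?_⟩
      · rw [hsplit, List.length_append]
        omega
      · unfold pvCand
        rw [hsplit, List.take_left]
        exact (List.intercalate_splitOn k '-').symm
  · rintro ⟨i, h1, h2, rfl⟩
    rcases Nat.lt_or_ge i (bl.splitOn '-').length with hlt | hge
    · right
      have hsplit : bl.splitOn '-' = (bl.splitOn '-').take i ++ (bl.splitOn '-').drop i :=
        (List.take_append_drop i _).symm
      have hbl : bl = ['-'].intercalate (bl.splitOn '-') := (List.intercalate_splitOn bl '-').symm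
      have htake : (bl.splitOn '-').take i ≠ [] := by
        rw [Ne, List.take_eq_nil_iff]
        push_neg
        exact ⟨by omega, pvSplitOn_ne_nil '-' bl⟩
      have hdrop : (bl.splitOn '-').drop i ≠ [] := by
        rw [Ne, List.drop_eq_nil_iff]
        omega
      have hsteps : bl = pvCand bl i ++ '-' :: ['-'].intercalate ((bl.splitOn '-').drop i) := by
        conv_lhs => rw [hbl, hsplit]
        exact pvIntercalate_append '-' _ _ htake hdrop
      exact ⟨_, by simpa using hsteps.symm⟩
    · left
      have hi : i = (bl.splitOn '-').length := le_antisymm h2 hge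
      rw [hi, pvCand_top]

-- candidate lengths are strictly monotone in the prefix length
theorem pvCand_succ (bl : List Char) (i : Nat) (h1 : 1 ≤ i) (h2 : i < (bl.splitOn '-').length) :
    pvCand bl (i + 1) = pvCand bl i ++ '-' :: (bl.splitOn '-')[i] := by
  unfold pvCand
  rw [List.take_add_one, List.getElem?_eq_getElem h2]
  have htake : (bl.splitOn '-').take i ≠ [] := by
    rw [Ne, List.take_eq_nil_iff]
    push_neg
    exact ⟨by omega, pvSplitOn_ne_nil '-' bl⟩
  simp only [Option.toList_some]
  rw [pvIntercalate_append '-' _ _ htake (by simp)]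
  simp [List.intercalate]

theorem pvCand_len_lt (bl : List Char) {i j : Nat} (h1 : 1 ≤ i) (hij : i < j)
    (hj : j ≤ (bl.splitOn '-').length) : (pvCand bl i).length < (pvCand bl j).length := by
  induction j with
  | zero => omega
  | succ m ih =>
    have hm : m < (bl.splitOn '-').length := by omega
    rcases Nat.lt_or_ge i m with him | hge
    · have := ih (by omega) (by omega)
      have hsucc := pvCand_succ bl m (by omega) hm
      rw [hsucc]
      simp only [List.length_append, List.length_cons]
      omega
    · have hi : i = m := by omega
      subst hi
      rw [pvCand_succ bl i h1 hm]
      simp only [List.length_append, List.length_cons]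
      omega

-- ---------- bridging A's string-level parts to char-level splitOn ----------
theorem pvParts_eq (base : String) :
    (PySem.Str.split? base "-").getD [] = (base.toList.splitOn '-').map String.ofList := by
  have hsep : ("-" : String).toList = ['-'] := rfl
  simp only [PySem.Str.split?, PySem.Chars.split?, hsep]
  rw [if_neg (by simp)]
  simp [pvSplitOn_single]

def pvPartsOf (base : String) : List String := (base.toList.splitOn '-').map String.ofList

def pvCandS (parts : List String) (i : Nat) : String :=
  PySem.Str.join "-" (parts.take i)

theorem pvCandS_toList (base : String) (i : Nat) :
    (pvCandS (pvPartsOf base) i).toList = pvCand base.toList i := by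
  unfold pvCandS pvCand pvPartsOf
  rw [PySem.Str.toList_join]
  unfold PySem.Chars.join
  rw [← List.map_take, List.map_map]
  congr 1
  simp [Function.comp_def]

theorem pvToList_inj {a b : String} (h : a.toList = b.toList) : a = b := by
  have := congrArg String.ofList h
  simpa [String.ofList_toList] using this

-- ---------- A's loop as a downward recursion pvF ----------
def pvF (parts : List String) : Nat → Int
  | 0 => pvDEFAULT_CONTEXT_WINDOW
  | i + 1 =>
    match pvMODEL_CONTEXT_WINDOWS.get? (pvCandS parts (i + 1)) with
    | some v => v
    | none => pvF parts i

theorem pvRange_down_eq (m : Nat) :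
    PySem.List.pyRange (m : Int) 0 (-1)
      = (List.range m).map (fun k : Nat => (m : Int) - (k : Int)) := by
  unfold PySem.List.pyRange
  rw [if_neg (by norm_num)]
  rw [if_neg (by norm_num)]
  cases m with
  | zero => rw [if_neg (by norm_num)]; simp
  | succ n =>
    rw [if_pos (by positivity)]
    have hc : ((((n + 1 : Nat) : Int) - 0 + - -1 - 1) / - -1).toNat = n + 1 := by
      norm_num
    rw [hc]
    exact List.map_congr_left (fun k _ => by push_cast; ring)

theorem pvRange_down_cons (m : Nat) :
    PySem.List.pyRange ((m + 1 : Nat) : Int) 0 (-1)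
      = ((m + 1 : Nat) : Int) :: PySem.List.pyRange (m : Int) 0 (-1) := by
  rw [pvRange_down_eq, pvRange_down_eq, List.range_succ_eq_map]
  rw [List.map_cons, List.map_map]
  refine congrArg₂ List.cons (by simp) ?_
  refine List.map_congr_left (fun k _ => ?_)
  simp only [Function.comp]
  push_cast
  ring

theorem pvLoopA_eq_F (parts : List String) (m : Nat) (hm : m ≤ parts.length) :
    pvLoopA parts (PySem.List.pyRange (m : Int) 0 (-1)) = pvF parts m := by
  induction m with
  | zero =>
    rw [pvRange_down_eq]
    simp [pvLoopA, pvF]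
  | succ i ih =>
    rw [pvRange_down_cons]
    simp only [pvLoopA, pvF]
    have hslice : PySem.List.slice parts none (some ((i + 1 : Nat) : Int))
        = parts.take (i + 1) := by
      rw [PySem.List.slice_to parts (by exact_mod_cast Int.natCast_nonneg (i+1))]
      simp
    rw [hslice]
    have := ih (by omega)
    unfold pvCandS
    cases pvMODEL_CONTEXT_WINDOWS.get? (PySem.Str.join "-" (parts.take (i + 1))) with
    | some v => rfl
    | none => simpa [pvCandS] using this

theorem pvF_default (parts : List String) (n : Nat)
    (h : ∀ i, 1 ≤ i → i ≤ n → pvMODEL_CONTEXT_WINDOWS.get? (pvCandS parts i) = none) :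
    pvF parts n = pvDEFAULT_CONTEXT_WINDOW := by
  induction n with
  | zero => rfl
  | succ m ih =>
    simp only [pvF, h (m + 1) (by omega) (le_refl _)]
    exact ih (fun i h1 h2 => h i h1 (by omega))

theorem pvF_top (parts : List String) (n i : Nat) (v : Int) (h1 : 1 ≤ i) (hin : i ≤ n)
    (hv : pvMODEL_CONTEXT_WINDOWS.get? (pvCandS parts i) = some v)
    (hmax : ∀ j, i < j → j ≤ n → pvMODEL_CONTEXT_WINDOWS.get? (pvCandS parts j) = none) :
    pvF parts n = v := by
  induction n with
  | zero => omega
  | succ m ih =>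
    rcases Nat.lt_or_ge i (m + 1) with hlt | hge
    · simp only [pvF, hmax (m + 1) hlt (le_refl _)]
      exact ih (by omega) (fun j hj1 hj2 => hmax j hj1 (by omega))
    · have : i = m + 1 := by omega
      subst this
      simp only [pvF, hv]

-- ---------- B's fold: argmax by key length ----------
theorem pvFold_no_update (base : String) (items : List (String × Int)) (st : Int × Int)
    (h : ∀ kv ∈ items,
      (kv.1 = base ∨ PySem.Str.startswith base (kv.1 ++ "-") = true) →
      PySem.Str.len kv.1 ≤ st.1) :
    items.foldl (pvBestStep base) st = st := by
  induction items with
  | nil => rfl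
  | cons hd tl ih =>
    have hstep : pvBestStep base st hd = st := by
      unfold pvBestStep
      split_ifs with hc
      · exact absurd (h hd (by simp) hc.1) (by omega)
      · rfl
    simp only [List.foldl_cons, hstep]
    exact ih (fun kv hkv => h kv (by simp [hkv]))

theorem pvFold_max (base : String) (items : List (String × Int)) (k : String) (v : Int)
    (st : Int × Int)
    (hmem : (k, v) ∈ items)
    (hP : k = base ∨ PySem.Str.startswith base (k ++ "-") = true)
    (hnd : (items.map Prod.fst).Nodup)
    (hmax : ∀ kv ∈ items,
      (kv.1 = base ∨ PySem.Str.startswith base (kv.1 ++ "-") = true) →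
      kv.1 ≠ k → PySem.Str.len kv.1 < PySem.Str.len k)
    (hst : st.1 < PySem.Str.len k) :
    items.foldl (pvBestStep base) st = (PySem.Str.len k, v) := by
  induction items generalizing st with
  | nil => exact absurd hmem (by simp)
  | cons hd tl ih =>
    simp only [List.map_cons, List.nodup_cons] at hnd
    rcases List.mem_cons.mp hmem with heq | htl
    · subst heq
      have hstep : pvBestStep base st (k, v) = (PySem.Str.len k, v) := by
        unfold pvBestStep
        rw [if_pos ⟨hP, hst⟩]
      simp only [List.foldl_cons, hstep]
      apply pvFold_no_update
      intro kv hkv hPkv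
      have hne : kv.1 ≠ (k, v).1 := by
        intro hkk
        apply hnd.1
        rw [← hkk]
        exact List.mem_map_of_mem hkv
      have := hmax kv (List.mem_cons_of_mem _ hkv) hPkv hne
      omega
    · have hne : hd.1 ≠ k := by
        intro hkk
        apply hnd.1
        rw [hkk]
        have : (k, v).1 ∈ tl.map Prod.fst := List.mem_map_of_mem htl
        exact this
      simp only [List.foldl_cons]
      have hst' : (pvBestStep base st hd).1 < PySem.Str.len k := by
        unfold pvBestStep
        split_ifs with hc
        · exact hmax hd (List.mem_cons_self ..) hc.1 hne
        · exact hst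
      exact ih (pvBestStep base st hd) htl hnd.2
        (fun kv hkv hPkv hnekv => hmax kv (List.mem_cons_of_mem _ hkv) hPkv hnekv) hst'

-- ---------- facts about the concrete table ----------
theorem pvDict_nodup : (pvMODEL_CONTEXT_WINDOWS.items.map Prod.fst).Nodup := by decide

theorem pvGet?_isSome_of_mem {k : String} {v : Int}
    (h : (k, v) ∈ pvMODEL_CONTEXT_WINDOWS.items) :
    (pvMODEL_CONTEXT_WINDOWS.get? k).isSome = true := by
  unfold PySem.Dict.get?
  rw [Option.isSome_map]
  exact List.find?_isSome.mpr ⟨(k, v), h, by simp⟩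

theorem pvGet?_mem {k : String} {v : Int}
    (h : pvMODEL_CONTEXT_WINDOWS.get? k = some v) :
    (k, v) ∈ pvMODEL_CONTEXT_WINDOWS.items := by
  unfold PySem.Dict.get? at h
  rcases Option.map_eq_some_iff.mp h with ⟨⟨k', v'⟩, hfind, hv⟩
  have hk : k' = k := by simpa using List.find?_some hfind
  have hm := List.mem_of_find?_eq_some hfind
  simp only at hv
  rw [← hk, ← hv]
  exact hm

-- ---------- the main bridge: after the exact-name miss, both sides agree ----------
theorem pvBody_eq (base : String) :
    (match pvMODEL_CONTEXT_WINDOWS.get? base with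
      | some v => v
      | none =>
        pvLoopA ((PySem.Str.split? base "-").getD [])
          (PySem.List.pyRange ((((PySem.Str.split? base "-").getD []).length : Nat) : Int) 0 (-1)))
      = (pvMODEL_CONTEXT_WINDOWS.items.foldl (pvBestStep base) (-1, pvDEFAULT_CONTEXT_WINDOW)).2 := by
  have hdef : (PySem.Str.split? base "-").getD [] = pvPartsOf base := pvParts_eq base
  rw [hdef]
  have hn : (pvPartsOf base).length = (base.toList.splitOn '-').length := by
    unfold pvPartsOf; exact List.length_map ..
  -- the top candidate is base itself
  have htop : pvCandS (pvPartsOf base) (pvPartsOf base).length = base := by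
    apply pvToList_inj
    rw [pvCandS_toList base, hn, pvCand_top]
  have hpos : 1 ≤ (pvPartsOf base).length := by
    rw [hn]
    exact pvSplitOn_len_pos '-' base.toList
  -- string-level characterization of the boundary-match condition
  have hchar : ∀ k : String,
      (k = base ∨ PySem.Str.startswith base (k ++ "-") = true)
        ↔ ∃ i, 1 ≤ i ∧ i ≤ (pvPartsOf base).length ∧ k = pvCandS (pvPartsOf base) i := by
    intro k
    have h1 : (k = base ∨ PySem.Str.startswith base (k ++ "-") = true)
        ↔ (k.toList = base.toList ∨ (k.toList ++ ['-']) <+: base.toList) := by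
      constructor
      · rintro (rfl | hsw)
        · exact Or.inl rfl
        · right
          have := (PySem.Chars.startswith_iff _ _).mp hsw
          simpa [String.toList_append] using this
      · rintro (htl | hpre)
        · exact Or.inl (pvToList_inj htl)
        · right
          rw [PySem.Str.startswith, PySem.Chars.startswith_iff]
          simpa [String.toList_append] using hpre
    rw [h1, pvChar_iff base.toList k.toList, ← hn]
    constructor
    · rintro ⟨i, hi1, hi2, hk⟩
      refine ⟨i, hi1, hi2, ?_⟩
      apply pvToList_inj
      rw [pvCandS_toList base]
      exact hk
    · rintro ⟨i, hi1, hi2, rfl⟩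
      exact ⟨i, hi1, hi2, pvCandS_toList base i⟩
  -- candidate lengths are strictly monotone
  have hlen : ∀ i j : Nat, 1 ≤ i → i < j → j ≤ (pvPartsOf base).length →
      PySem.Str.len (pvCandS (pvPartsOf base) i) < PySem.Str.len (pvCandS (pvPartsOf base) j) := by
    intro i j hi hij hj
    unfold PySem.Str.len
    rw [pvCandS_toList base, pvCandS_toList base]
    have := pvCand_len_lt base.toList hi hij (by rw [← hn]; exact hj)
    exact_mod_cast this
  -- the left side is pvF
  have hA : (match pvMODEL_CONTEXT_WINDOWS.get? base with
      | some v => v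
      | none => pvLoopA (pvPartsOf base)
          (PySem.List.pyRange (((pvPartsOf base).length : Nat) : Int) 0 (-1)))
      = pvF (pvPartsOf base) (pvPartsOf base).length := by
    obtain ⟨m, hm⟩ : ∃ m, (pvPartsOf base).length = m + 1 := ⟨(pvPartsOf base).length - 1, by omega⟩
    cases hbase : pvMODEL_CONTEXT_WINDOWS.get? base with
    | some v =>
      rw [hm]
      simp only [pvF]
      rw [show pvCandS (pvPartsOf base) (m + 1) = base from hm ▸ htop, hbase]
    | none => exact pvLoopA_eq_F (pvPartsOf base) (pvPartsOf base).length (le_refl _)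
  rw [hA]
  -- now compare pvF with the fold
  by_cases hex : ∃ i, 1 ≤ i ∧ i ≤ (pvPartsOf base).length ∧
      (pvMODEL_CONTEXT_WINDOWS.get? (pvCandS (pvPartsOf base) i)).isSome = true
  · -- there is a matching candidate; take the greatest index
    classical
    obtain ⟨i0, hi01, hi0n, hi0s⟩ := hex
    have hPstar : 1 ≤ Nat.findGreatest
          (fun i => 1 ≤ i ∧ (pvMODEL_CONTEXT_WINDOWS.get? (pvCandS (pvPartsOf base) i)).isSome = true)
          (pvPartsOf base).length ∧
        (pvMODEL_CONTEXT_WINDOWS.get? (pvCandS (pvPartsOf base)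
          (Nat.findGreatest
            (fun i => 1 ≤ i ∧ (pvMODEL_CONTEXT_WINDOWS.get? (pvCandS (pvPartsOf base) i)).isSome = true)
            (pvPartsOf base).length))).isSome = true :=
      Nat.findGreatest_spec
        (P := fun i => 1 ≤ i ∧ (pvMODEL_CONTEXT_WINDOWS.get? (pvCandS (pvPartsOf base) i)).isSome = true)
        hi0n ⟨hi01, hi0s⟩
    set istar := Nat.findGreatest
        (fun i => 1 ≤ i ∧ (pvMODEL_CONTEXT_WINDOWS.get? (pvCandS (pvPartsOf base) i)).isSome = true)
        (pvPartsOf base).length with histar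
    have histar_le : istar ≤ (pvPartsOf base).length := Nat.findGreatest_le _
    have hgt : ∀ j, istar < j → j ≤ (pvPartsOf base).length →
        pvMODEL_CONTEXT_WINDOWS.get? (pvCandS (pvPartsOf base) j) = none := by
      intro j hj1 hj2
      have hng := Nat.findGreatest_is_greatest
        (P := fun i => 1 ≤ i ∧ (pvMODEL_CONTEXT_WINDOWS.get? (pvCandS (pvPartsOf base) i)).isSome = true)
        hj1 hj2
      cases hs : pvMODEL_CONTEXT_WINDOWS.get? (pvCandS (pvPartsOf base) j) with
      | none => rfl
      | some w => exact absurd ⟨by omega, by rw [hs]; rfl⟩ hng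
    obtain ⟨vstar, hvstar⟩ := Option.isSome_iff_exists.mp hPstar.2
    have hmemstar := pvGet?_mem hvstar
    have hFv : pvF (pvPartsOf base) (pvPartsOf base).length = vstar :=
      pvF_top (pvPartsOf base) (pvPartsOf base).length istar vstar hPstar.1 histar_le hvstar hgt
    have hfold : pvMODEL_CONTEXT_WINDOWS.items.foldl (pvBestStep base)
        (-1, pvDEFAULT_CONTEXT_WINDOW) = (PySem.Str.len (pvCandS (pvPartsOf base) istar), vstar) := by
      apply pvFold_max base _ _ _ _ hmemstar
      · exact (hchar _).mpr ⟨istar, hPstar.1, histar_le, rfl⟩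
      · exact pvDict_nodup
      · intro kv hkv hPkv hne
        obtain ⟨j, hj1, hj2, hkj⟩ := (hchar kv.1).mp hPkv
        rcases Nat.lt_trichotomy j istar with hlt | heq | hgt'
        · rw [hkj]
          exact hlen j istar hj1 hlt histar_le
        · exact absurd (heq ▸ hkj) hne
        · exfalso
          have hnone := hgt j hgt' hj2
          have hs := pvGet?_isSome_of_mem (v := kv.2) (by simpa using hkv)
          rw [hkj, hnone] at hs
          simp at hs
      · have hnn : (0 : Int) ≤ PySem.Str.len (pvCandS (pvPartsOf base) istar) := by
          unfold PySem.Str.len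
          exact Int.natCast_nonneg _
        omega
    rw [hfold, hFv]
  · -- no candidate matches: both sides give the default
    push_neg at hex
    have hnone : ∀ i, 1 ≤ i → i ≤ (pvPartsOf base).length →
        pvMODEL_CONTEXT_WINDOWS.get? (pvCandS (pvPartsOf base) i) = none := by
      intro i h1 h2
      cases hs : pvMODEL_CONTEXT_WINDOWS.get? (pvCandS (pvPartsOf base) i) with
      | none => rfl
      | some w =>
        exact absurd (show (pvMODEL_CONTEXT_WINDOWS.get? (pvCandS (pvPartsOf base) i)).isSome = true
          from by rw [hs]; rfl) (by simpa using hex i h1 h2)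
    rw [pvF_default (pvPartsOf base) (pvPartsOf base).length hnone]
    have hnu : pvMODEL_CONTEXT_WINDOWS.items.foldl (pvBestStep base)
        (-1, pvDEFAULT_CONTEXT_WINDOW) = (-1, pvDEFAULT_CONTEXT_WINDOW) := by
      apply pvFold_no_update
      intro kv hkv hPkv
      obtain ⟨j, hj1, hj2, hkj⟩ := (hchar kv.1).mp hPkv
      exfalso
      have hs := pvGet?_isSome_of_mem (v := kv.2) (by simpa using hkv)
      rw [hkj, hnone j hj1 hj2] at hs
      simp at hs
    rw [hnu]

-- ===== VERDICT (by name: the statement is the Claim_ definition above) =====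
theorem get_context_window_spec : Claim_equal_get_context_window := by
  intro s _
  unfold Spec_get_context_window get_context_window get_context_window_alt
  by_cases hs : s = ""
  · simp [hs]
  · simp only [hs, if_false]
    -- the stripped name is the same in both ports
    have hname :
        (if PySem.Str.isIn "/" s then
          PySem.List.pyGetD ((PySem.Str.split? s "/").getD []) (-1) "" else s)
        = PySem.List.pyGetD ((PySem.Str.split? s "/").getD []) (-1) "" := by
      cases hin : PySem.Str.isIn "/" s with
      | true => simp
      | false =>
        rw [pvSplit?_of_not_isIn s "/" (by decide) hin]
        simp [PySem.List.pyGetD_neg_one [s] "" (by simp)]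
    rw [hname]
    set name := PySem.List.pyGetD ((PySem.Str.split? s "/").getD []) (-1) "" with hn
    cases hget : pvMODEL_CONTEXT_WINDOWS.get? name with
    | some v => rfl
    | none =>
      set base := PySem.List.pyGetD ((PySem.Str.split? name ":").getD []) 0 "" with hb
      have := pvBody_eq base
      cases hbase : pvMODEL_CONTEXT_WINDOWS.get? base with
      | some v => rw [hbase] at this; exact this
      | none => rw [hbase] at this; exact this
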